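-- pv_equiv track=rewrite | github.com/ffekirnew/a2sv-competitive-programming | 2491-divide-players-into-teams-of-equal-skill/2491-divide-players-into-teams-of-equal-skill.py | dividePlayers
-- ===== SOURCE A (Python) =====
-- from typing import List
--
-- def dividePlayers(skill: List[int]) -> int:
--     sum_chemistry = 0
--
--     # sort the skills
--     skill.sort()
--
--     # set up two pointers
--     teams = []
--
--     left = 0
--     right = len(skill) - 1
--
--
--     # form the teams
--     while left < right:
--         teams.append(tuple([skill[left], skill[right]]))
--         left += 1
--         right -= 1
--
--     # check if all teams have the same skills
--     sum_skill = sum(teams[0])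
--
--     for team in teams:
--         if sum(team) != sum_skill:
--             return -1
--         sum_chemistry += team[0] * team[1]
--
--     return sum_chemistry
-- ===== SOURCE B (Python) =====
-- from typing import List
--
-- def dividePlayers(skill: List[int]) -> int:
--     # Hash-count re-implementation: no sorting. Does not mutate skill (A sorts it in place).
--     n = len(skill)
--     total = sum(skill)
--     if n % 2 == 1 or (2 * total) % n != 0:
--         return -1
--     target = (2 * total) // n
--     count = {}
--     for v in skill:
--         count[v] = count.get(v, 0) + 1
--     for v in skill:
--         if count.get(target - v, 0) != count.get(v, 0):
--             return -1
--     chem2 = 0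
--     for v in skill:
--         chem2 += v * (target - v)
--     return chem2 // 2
-- ===== Notes on version B (the rewrite author's own statement) =====
-- stated objective: faster
-- what changed: Replaces sort + two-pointer pairing by an O(n) hash-count check (every value must have its complement to target = 2*total/n equally often) and a closed-form chemistry sum sum(v*(target-v))/2, without mutating the input list.
-- intended difference: On odd-length lists (>= 3) whose sorted outer pairs all have equal sums, A silently ignores the middle player and returns the chemistry of the outer pairs, while B returns -1, the intended answer since an odd number of players cannot be divided into teams of two. — e.g. on dividePlayers([1, 2, 3]): A returns 3, B returns -1
-- outside the precondition, e.g. on dividePlayers([0]): A raises IndexError, B returns -1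
import Mathlib
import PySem

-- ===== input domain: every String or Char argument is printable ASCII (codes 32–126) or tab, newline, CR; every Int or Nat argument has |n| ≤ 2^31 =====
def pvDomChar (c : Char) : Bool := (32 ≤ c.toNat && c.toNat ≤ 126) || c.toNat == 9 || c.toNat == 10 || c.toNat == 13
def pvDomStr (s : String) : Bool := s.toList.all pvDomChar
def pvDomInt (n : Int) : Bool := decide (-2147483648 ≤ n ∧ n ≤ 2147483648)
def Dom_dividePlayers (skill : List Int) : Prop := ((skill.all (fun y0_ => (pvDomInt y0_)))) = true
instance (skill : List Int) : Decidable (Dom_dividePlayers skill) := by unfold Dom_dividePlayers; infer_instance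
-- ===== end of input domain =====

-- B replaces A's sort + two-pointer pairing by an O(n) hash-count check (complement counts
-- around target = 2*total/n) and a closed-form chemistry sum; equivalence is about the RETURN
-- value only: A sorts its argument in place, B does not mutate it.

-- ===== PORT A =====
-- while left < right: teams.append((skill[left], skill[right])); left += 1; right -= 1
-- (indices stay in range: 0 ≤ left < right ≤ len(skill) - 1, so skill[left]/skill[right] never raise)
-- fuel = (right - left).toNat bounds the number of iterations; it only makes the loop total
def pvA_loop (fuel : Nat) (skill : List Int) (teams : List (Int × Int)) (left right : Int) :
    List (Int × Int) :=
  match fuel with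
  | 0 => teams
  | fuel + 1 =>
    if left < right then
      pvA_loop fuel skill
        (teams ++ [(PySem.List.pyGetD skill left 0, PySem.List.pyGetD skill right 0)])
        (left + 1) (right - 1)
    else teams

-- for team in teams: if sum(team) != sum_skill: return -1; sum_chemistry += team[0]*team[1]
def pvA_check (teams : List (Int × Int)) (sum_skill sum_chemistry : Int) : Int :=
  match teams with
  | [] => sum_chemistry
  | (a, b) :: rest =>
      if a + b ≠ sum_skill then -1 else pvA_check rest sum_skill (sum_chemistry + a * b)

def dividePlayers (skill : List Int) : Int :=
  let skill := PySem.List.sorted skill (fun x => x) false   -- skill.sort()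
  let teams : List (Int × Int) := []
  let left : Int := 0
  let right : Int := (skill.length : Int) - 1
  let teams := pvA_loop (right - left).toNat skill teams left right
  match PySem.List.pyGet? teams 0 with
  | none => 0                                  -- teams[0] raises IndexError (len(skill) ≤ 1): outside Pre_
  | some t => pvA_check teams (t.1 + t.2) 0    -- sum_skill = sum(teams[0])

-- ===== PORT B =====
-- for v in skill: if count.get(target - v, 0) != count.get(v, 0): return -1
def pvB_check (vs : List Int) (cnt : PySem.Dict Int Int) (target : Int) : Bool :=
  match vs with
  | [] => true
  | v :: rest =>
      if cnt.getD (target - v) 0 ≠ cnt.getD v 0 then false else pvB_check rest cnt target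

def dividePlayers_alt (skill : List Int) : Int :=
  let n : Int := (skill.length : Int)
  let total : Int := skill.sum
  -- n = 0 raises ZeroDivisionError in Python at (2*total) % n: outside Pre_
  if PySem.Int.mod n 2 = 1 ∨ PySem.Int.mod (2 * total) n ≠ 0 then -1
  else
    let target : Int := PySem.Int.floordiv (2 * total) n
    let cnt : PySem.Dict Int Int :=
      skill.foldl (fun d v => d.insert v (d.getD v 0 + 1)) PySem.Dict.empty
    if pvB_check skill cnt target = false then -1
    else PySem.Int.floordiv (skill.foldl (fun acc v => acc + v * (target - v)) 0) 2

-- ===== PRECONDITION & SPEC =====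
-- Pre_ excludes only the lists of length ≤ 1, on which A raises IndexError at teams[0].
def Pre_dividePlayers (skill : List Int) : Prop := 2 ≤ skill.length
instance (skill : List Int) : Decidable (Pre_dividePlayers skill) := by
  unfold Pre_dividePlayers; infer_instance
def pvWitness_dividePlayers : List Int := [1, 5, 3, 3]


-- On odd-length lists (≥ 3) whose sorted outer pairs all have equal sums, A silently ignores the
-- middle player and returns the chemistry of the outer pairs, while B returns -1, the intended
-- answer since an odd number of players cannot be divided into teams of two.
def pvS (skill : List Int) : List Int := List.insertionSort (· ≤ ·) skill

def D_dividePlayers (skill : List Int) : Prop :=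
  skill.length % 2 = 1 ∧ ∀ i < skill.length / 2,
    (pvS skill).getD i 0 + (pvS skill).getD (skill.length - 1 - i) 0 =
      (pvS skill).getD 0 0 + (pvS skill).getD (skill.length - 1) 0
instance (skill : List Int) : Decidable (D_dividePlayers skill) := by
  unfold D_dividePlayers; infer_instance

def Spec_dividePlayers (skill : List Int) (out : Int) : Prop :=
  ¬ D_dividePlayers skill → out = dividePlayers_alt skill
instance (skill : List Int) (out : Int) : Decidable (Spec_dividePlayers skill out) := by
  unfold Spec_dividePlayers; infer_instance

def pvDiffWitness_dividePlayers : List Int := [1, 2, 3]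
def pvDiffWitnessOut_dividePlayers : Int × Int := (3, -1)

-- ===== CLAIM (what is proved, stated in full; the proofs are below) =====
def Claim_unchanged_dividePlayers : Prop := ∀ (skill : List Int), Dom_dividePlayers skill →
  Pre_dividePlayers skill → Spec_dividePlayers skill (dividePlayers skill)
def Claim_changed_dividePlayers : Prop :=
  Dom_dividePlayers (pvDiffWitness_dividePlayers) ∧ Pre_dividePlayers (pvDiffWitness_dividePlayers) ∧
  D_dividePlayers (pvDiffWitness_dividePlayers) ∧
  dividePlayers (pvDiffWitness_dividePlayers) = pvDiffWitnessOut_dividePlayers.1 ∧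
  dividePlayers_alt (pvDiffWitness_dividePlayers) = pvDiffWitnessOut_dividePlayers.2 ∧
  pvDiffWitnessOut_dividePlayers.1 ≠ pvDiffWitnessOut_dividePlayers.2

-- ===== LEMMAS AND PROOFS =====

theorem pvS_eq_sorted (skill : List Int) :
    pvS skill = PySem.List.sorted skill (fun x => x) false := by
  symm
  apply PySem.List.sorted_id_eq_of_perm_of_pairwise
  · exact List.perm_insertionSort _ skill
  · exact List.pairwise_insertionSort _ skill

-- the sorted list is a "palindrome around t": s reversed and complemented is s itself
def pvPal (s : List Int) (t : Int) : Prop := s = (s.map (fun x => t - x)).reverse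

theorem pvPal_getD (s : List Int) (t : Int) (hp : pvPal s t) (i : Nat) (hi : i < s.length) :
    s.getD i 0 + s.getD (s.length - 1 - i) 0 = t := by
  have h1 := congrArg (fun l : List Int => l.getD i 0) hp
  simp only [List.getD] at h1 ⊢
  rw [List.getElem?_reverse (by simpa using hi), List.getElem?_map] at h1
  simp only [List.length_map] at h1
  rw [List.getElem?_eq_getElem (by omega)] at h1
  rw [List.getElem?_eq_getElem hi,
    List.getElem?_eq_getElem (show s.length - 1 - i < s.length by omega)] at *
  simp at h1 ⊢
  omega

theorem pvPal_of_getD (s : List Int) (t : Int)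
    (h : ∀ i < s.length, s.getD i 0 + s.getD (s.length - 1 - i) 0 = t) : pvPal s t := by
  apply List.ext_getElem (by simp)
  intro i hi hi2
  rw [List.getElem_reverse, List.getElem_map]
  simp only [List.length_map] at *
  have h1 := h i hi
  have h2 := h (s.length - 1 - i) (by omega)
  rw [show s.length - 1 - (s.length - 1 - i) = i by omega] at h2
  rw [List.getD_eq_getElem _ _ hi,
    List.getD_eq_getElem _ _ (show s.length - 1 - i < s.length by omega)] at h1 h2
  omega

theorem pvCount_map_reverse (s : List Int) (t v : Int) :
    ((s.map (fun x => t - x)).reverse).count v = s.count (t - v) := by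
  rw [List.count_reverse]
  have hinj : Function.Injective (fun x : Int => t - x) := by intro a b h; simp at h; omega
  have := List.count_map_of_injective (l := s) (f := fun x : Int => t - x) (x := t - v) hinj
  simpa using this

theorem pvPal_count (s : List Int) (t : Int) (hp : pvPal s t) (v : Int) :
    s.count (t - v) = s.count v := by
  conv_rhs => rw [hp]
  rw [pvCount_map_reverse]

theorem pvPal_of_count (s : List Int) (t : Int) (hs : s.Pairwise (· ≤ ·))
    (h : ∀ v : Int, s.count (t - v) = s.count v) : pvPal s t := by
  have hperm : s.Perm ((s.map (fun x => t - x)).reverse) := by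
    rw [List.perm_iff_count]
    intro v
    rw [pvCount_map_reverse]
    exact (h v).symm
  have hsorted : ((s.map (fun x => t - x)).reverse).Pairwise (· ≤ ·) := by
    rw [List.pairwise_reverse, List.pairwise_map]
    exact hs.imp (by intro a b hab; omega)
  exact hperm.eq_of_pairwise (fun a b _ _ h1 h2 => le_antisymm h1 h2) hs hsorted

theorem pvSum_map_sub (s : List Int) (t : Int) :
    (s.map (fun x => t - x)).sum = (s.length : Int) * t - s.sum := by
  induction s with
  | nil => simp
  | cons a rest ih => simp [ih]; ring

theorem pvPal_sum (s : List Int) (t : Int) (hp : pvPal s t) :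
    2 * s.sum = (s.length : Int) * t := by
  have h1 := congrArg List.sum hp
  rw [List.sum_reverse, pvSum_map_sub] at h1
  omega

-- A's while loop produces exactly the k = (right-left+1)/2 outer pairs
theorem pvA_loop_eq (k : Nat) : ∀ (fuel : Nat) (s : List Int) (teams : List (Int × Int)) (l r : Int),
    k ≤ fuel → 0 ≤ l → r < (s.length : Int) → (r - l + 1 = 2 * k ∨ r - l + 1 = 2 * k + 1) →
    pvA_loop fuel s teams l r =
      teams ++ (List.range k).map (fun j => (s.getD (l.toNat + j) 0, s.getD (r.toNat - j) 0)) := by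
  induction k with
  | zero =>
    intro fuel s teams l r hf hl hr hk
    have hlr : ¬ l < r := by omega
    cases fuel <;> simp [pvA_loop, hlr]
  | succ k ih =>
    intro fuel s teams l r hf hl hr hk
    have hlr : l < r := by omega
    obtain ⟨fuel, rfl⟩ : ∃ f, fuel = f + 1 := ⟨fuel - 1, by omega⟩
    simp only [pvA_loop, hlr, if_true]
    rw [ih fuel s _ (l + 1) (r - 1) (by omega) (by omega) (by omega) (by omega)]
    rw [List.append_assoc]
    congr 1
    rw [List.range_succ_eq_map, List.map_cons, List.map_map, List.singleton_append]
    congr 1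
    · rw [PySem.List.pyGetD_of_nonneg (xs := s) (d := 0) (i := l) hl,
        PySem.List.pyGetD_of_nonneg (xs := s) (d := 0) (i := r) (by omega)]
      simp
    · apply List.map_congr_left
      intro j hj
      simp only [Function.comp]
      congr 2 <;> omega

theorem pvA_check_good (teams : List (Int × Int)) (t acc : Int)
    (h : ∀ p ∈ teams, p.1 + p.2 = t) :
    pvA_check teams t acc = acc + (teams.map (fun p => p.1 * p.2)).sum := by
  induction teams generalizing acc with
  | nil => simp [pvA_check]
  | cons p rest ih =>
    obtain ⟨a, b⟩ := p
    have ha : a + b = t := h (a, b) (by simp)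
    simp only [pvA_check, ha, ne_eq, not_true_eq_false, if_neg, not_false_eq_true]
    rw [ih _ (fun p hp => h p (List.mem_cons_of_mem _ hp))]
    simp; ring

theorem pvA_check_bad (teams : List (Int × Int)) (t acc : Int)
    (h : ∃ p ∈ teams, p.1 + p.2 ≠ t) : pvA_check teams t acc = -1 := by
  induction teams generalizing acc with
  | nil => simp at h
  | cons p rest ih =>
    obtain ⟨a, b⟩ := p
    by_cases hab : a + b = t
    · simp only [pvA_check, hab, ne_eq, not_true_eq_false, if_neg, not_false_eq_true]
      apply ih
      obtain ⟨q, hq, hqt⟩ := h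
      rcases List.mem_cons.mp hq with h1 | h1
      · exact absurd (h1 ▸ hab) hqt
      · exact ⟨q, h1, hqt⟩
    · simp [pvA_check, hab]

theorem pvB_check_iff (vs : List Int) (cnt : PySem.Dict Int Int) (t : Int) :
    pvB_check vs cnt t = true ↔ ∀ v ∈ vs, cnt.getD (t - v) 0 = cnt.getD v 0 := by
  induction vs with
  | nil => simp [pvB_check]
  | cons v rest ih =>
    by_cases hv : cnt.getD (t - v) 0 = cnt.getD v 0
    · simp [pvB_check, hv, ih]
    · simp [pvB_check, hv]

theorem pvCount_sym_all (skill : List Int) (t : Int)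
    (h : ∀ v ∈ skill, skill.count (t - v) = skill.count v) :
    ∀ v : Int, skill.count (t - v) = skill.count v := by
  intro v
  by_cases hv : v ∈ skill
  · exact h v hv
  · rw [List.count_eq_zero_of_not_mem hv]
    by_contra hc
    have hmem : t - v ∈ skill := by
      by_contra hm
      exact hc (List.count_eq_zero_of_not_mem hm)
    have := h (t - v) hmem
    rw [show t - (t - v) = v by ring] at this
    rw [List.count_eq_zero_of_not_mem hv] at this
    exact hc this.symm

theorem pvChem_fold (skill : List Int) (t : Int) :
    skill.foldl (fun acc v => acc + v * (t - v)) 0 = (skill.map (fun v => v * (t - v))).sum := by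
  rw [PySem.List.foldl_add]
  simp

-- reflection halving: if h i = h (n-1-i) then the full sum is twice the half sum (n = 2k)
theorem pvSum_halve (k : Nat) (h : Nat → Int) (hsym : ∀ i < 2 * k, h i = h (2 * k - 1 - i)) :
    ((List.range (2 * k)).map h).sum = 2 * ((List.range k).map h).sum := by
  have e1 : ∀ n, ((List.range n).map h).sum = ∑ i ∈ Finset.range n, h i := by
    intro n
    induction n with
    | zero => simp
    | succ n ih => rw [List.range_succ, List.map_append, List.sum_append, Finset.sum_range_succ, ih]; simp
  rw [e1, e1, two_mul k, Finset.sum_range_add]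
  have e2 : ∑ i ∈ Finset.range k, h (k + i) = ∑ i ∈ Finset.range k, h i := by
    calc ∑ i ∈ Finset.range k, h (k + i)
        = ∑ i ∈ Finset.range k, h (k - 1 - i) := by
          apply Finset.sum_congr rfl
          intro i hi
          simp only [Finset.mem_range] at hi
          rw [hsym (k + i) (by omega)]
          congr 1; omega
      _ = ∑ i ∈ Finset.range k, h i := Finset.sum_range_reflect h k
  rw [e2]; ring

-- ===== VERDICT (by name: the statement is the Claim_ definition above) =====
-- sum of f over a list, re-indexed through getD
theorem pvMap_sum_getD (l : List Int) (f : Int → Int) :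
    (l.map f).sum = ((List.range l.length).map (fun i => f (l.getD i 0))).sum := by
  induction l with
  | nil => simp
  | cons a rest ih =>
    simp only [List.map_cons, List.sum_cons, List.length_cons, List.range_succ_eq_map,
      List.map_map]
    rw [ih]
    simp [Function.comp_def]

theorem dividePlayers_spec : Claim_unchanged_dividePlayers := by
  intro skill _hdom hpre
  unfold Spec_dividePlayers
  intro hnd
  have hn2 : 2 ≤ skill.length := hpre
  set s : List Int := PySem.List.sorted skill (fun x => x) false with hs
  set n : Nat := skill.length with hndef
  have hlen : s.length = n := by rw [hs, hndef]; simp [PySem.List.length_sorted]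
  have hsort : s.Pairwise (· ≤ ·) := PySem.List.sorted_pairwise skill (fun x => x)
  have hperm : s.Perm skill := PySem.List.sorted_perm skill _ _
  clear_value s n
  set k : Nat := n / 2 with hkdef
  clear_value k
  set t0 : Int := s.getD 0 0 + s.getD (n - 1) 0 with ht0
  set g : Nat → Int × Int := fun j => (s.getD j 0, s.getD (n - 1 - j) 0) with hg
  -- A's teams list
  have hteams : pvA_loop ((s.length : Int) - 1 - 0).toNat s [] 0 ((s.length : Int) - 1)
      = (List.range k).map g := by
    have c1 : k ≤ ((s.length : Int) - 1 - 0).toNat := by rw [hlen]; omega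
    have c3 : ((s.length : Int) - 1) < ((s.length : Nat) : Int) := by omega
    have c4 : ((s.length : Int) - 1) - 0 + 1 = 2 * (k : Int) ∨
        ((s.length : Int) - 1) - 0 + 1 = 2 * (k : Int) + 1 := by
      rw [hlen]; omega
    rw [pvA_loop_eq k ((s.length : Int) - 1 - 0).toNat s [] 0 ((s.length : Int) - 1)
      c1 le_rfl c3 c4]
    simp only [List.nil_append]
    apply List.map_congr_left
    intro j hj
    rw [hg, hlen]
    congr 2 <;> omega
  -- A's result
  have hA : dividePlayers skill = pvA_check ((List.range k).map g) t0 0 := by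
    simp only [dividePlayers, ← hs, hteams]
    obtain ⟨k', hk'⟩ : ∃ k', k = k' + 1 := ⟨k - 1, by omega⟩
    rw [hk', List.range_succ_eq_map, List.map_cons]
    simp only [PySem.List.pyGet?, PySem.List.pyIdx?]
    norm_num [hg, hlen]
    rfl
  -- B setup
  have htot : skill.sum = s.sum := (hperm.sum_eq).symm
  have hcnt : ∀ v : Int, (skill.foldl (fun d v => d.insert v (d.getD v 0 + 1))
      PySem.Dict.empty).getD v 0 = (skill.count v : Int) := by
    intro v
    rw [PySem.Dict.foldl_insert_getD_add_one_eq_counter skill, PySem.Dict.getD_counter skill v]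
  have hcount : ∀ v : Int, skill.count v = s.count v := fun v => (hperm.count_eq v).symm
  by_cases hp : pvPal s t0
  · -- palindrome case: every outer pair sums to t0
    have hsum : 2 * s.sum = (s.length : Int) * t0 := pvPal_sum s t0 hp
    rcases Nat.even_or_odd n with he | ho
    · -- n even: both sides compute the chemistry
      have heven : n % 2 = 0 := Nat.even_iff.mp he
      have hk2 : 2 * k = n := by omega
      -- B's guards pass
      have hg1 : ¬ (PySem.Int.mod ((skill.length : Nat) : Int) 2 = 1) := by
        rw [← hndef, PySem.Int.mod_eq_emod_of_pos (by norm_num)]; omega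
      have hdvd : PySem.Int.mod (2 * skill.sum) ((skill.length : Nat) : Int) = 0 := by
        rw [← hndef, PySem.Int.mod_eq_zero_iff_dvd]
        exact ⟨t0, by rw [htot, hsum, hlen]⟩
      have htarget : PySem.Int.floordiv (2 * skill.sum) ((skill.length : Nat) : Int) = t0 := by
        rw [← hndef, PySem.Int.floordiv_eq_ediv_of_pos (by exact_mod_cast (by omega : 0 < n)),
          htot, hsum, hlen, Int.mul_ediv_cancel_left _ (by exact_mod_cast (by omega : n ≠ 0))]
      have hcheck : pvB_check skill (skill.foldl (fun d v => d.insert v (d.getD v 0 + 1))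
          PySem.Dict.empty) t0 = true := by
        rw [pvB_check_iff]
        intro v _
        rw [hcnt, hcnt, hcount, hcount, pvPal_count s t0 hp v]
      have hB : dividePlayers_alt skill = PySem.Int.floordiv
          (skill.foldl (fun acc v => acc + v * (t0 - v)) 0) 2 := by
        simp only [dividePlayers_alt, hg1, hdvd, htarget, hcheck]
        simp
      -- chemistry sums
      set h : Nat → Int := fun i => s.getD i 0 * (t0 - s.getD i 0) with hh
      have hpair : ∀ i < n, s.getD (n - 1 - i) 0 = t0 - s.getD i 0 := by
        intro i hi
        have := pvPal_getD s t0 hp i (by omega)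
        rw [hlen] at this
        omega
      have hsym : ∀ i < 2 * k, h i = h (2 * k - 1 - i) := by
        intro i hi
        rw [hh]
        simp only
        rw [hk2] at hi ⊢
        rw [← hpair i hi, ← hpair (n - 1 - i) (by omega),
          show n - 1 - (n - 1 - i) = i by omega]
        ring
      have hchem : skill.foldl (fun acc v => acc + v * (t0 - v)) 0
          = 2 * ((List.range k).map h).sum := by
        rw [pvChem_fold]
        have : (skill.map (fun v => v * (t0 - v))).sum = (s.map (fun v => v * (t0 - v))).sum :=
          ((hperm.map _).sum_eq).symm
        rw [this, pvMap_sum_getD, hlen, ← hk2, pvSum_halve k h hsym]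
      have hgood : ∀ p ∈ (List.range k).map g, p.1 + p.2 = t0 := by
        intro p hpmem
        obtain ⟨j, hj, rfl⟩ := List.mem_map.mp hpmem
        have hjk : j < k := List.mem_range.mp hj
        rw [hg]
        simp only
        rw [hpair j (by omega)]
        ring
      rw [hA, pvA_check_good _ _ _ hgood, hB, hchem]
      rw [PySem.Int.floordiv_eq_ediv_of_pos (by norm_num), Int.mul_ediv_cancel_left _ (by norm_num)]
      rw [List.map_map]
      simp only [zero_add]
      congr 1
      apply List.map_congr_left
      intro j hj
      have hjk : j < k := List.mem_range.mp hj
      rw [hg, hh]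
      simp only [Function.comp]
      rw [hpair j (by omega)]
    · -- n odd: D_ holds, contradicting hnd
      have hodd : n % 2 = 1 := Nat.odd_iff.mp ho
      exfalso
      apply hnd
      refine ⟨by omega, ?_⟩
      intro i hi
      have h1 := pvPal_getD s t0 hp i (by omega)
      have h2 := pvPal_getD s t0 hp 0 (by omega)
      rw [hlen] at h1 h2
      rw [pvS_eq_sorted, ← hs]
      simp only [← hndef]
      rw [show n - 1 - 0 = n - 1 by omega] at h2
      omega
  · -- not a palindrome: both sides return -1
    have hbad : ∃ i, i < k ∧ s.getD i 0 + s.getD (n - 1 - i) 0 ≠ t0 := by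
      rcases Nat.even_or_odd n with he | ho
      · have heven : n % 2 = 0 := Nat.even_iff.mp he
        by_contra hb
        push Not at hb
        apply hp
        apply pvPal_of_getD
        intro i hi
        rw [hlen] at hi ⊢
        by_cases hik : i < k
        · exact hb i hik
        · have h1 := hb (n - 1 - i) (by omega)
          rw [show n - 1 - (n - 1 - i) = i by omega] at h1
          omega
      · have hodd : n % 2 = 1 := Nat.odd_iff.mp ho
        unfold D_dividePlayers at hnd
        push Not at hnd
        obtain ⟨i, hi, hne⟩ := hnd (by omega)
        refine ⟨i, by omega, ?_⟩
        rw [pvS_eq_sorted, ← hs] at hne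
        simp only [← hndef] at hne
        exact hne
    obtain ⟨i, hik, hine⟩ := hbad
    have hAv : dividePlayers skill = -1 := by
      rw [hA]
      apply pvA_check_bad
      exact ⟨g i, List.mem_map.mpr ⟨i, List.mem_range.mpr hik, rfl⟩, by rw [hg]; simpa using hine⟩
    have hBv : dividePlayers_alt skill = -1 := by
      by_cases hgd : PySem.Int.mod ((skill.length : Nat) : Int) 2 = 1 ∨
          PySem.Int.mod (2 * skill.sum) ((skill.length : Nat) : Int) ≠ 0
      · simp only [dividePlayers_alt]
        rw [if_pos hgd]
      · have hcheck : pvB_check skill (skill.foldl (fun d v => d.insert v (d.getD v 0 + 1))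
            PySem.Dict.empty) (PySem.Int.floordiv (2 * skill.sum) ((skill.length : Nat) : Int))
            = false := by
          set target := PySem.Int.floordiv (2 * skill.sum) ((skill.length : Nat) : Int) with htg
          by_contra hcf
          have htrue : pvB_check skill (skill.foldl (fun d v => d.insert v (d.getD v 0 + 1))
              PySem.Dict.empty) target = true := by
            cases hx : pvB_check skill (skill.foldl (fun d v => d.insert v (d.getD v 0 + 1))
              PySem.Dict.empty) target
            · exact absurd hx hcf
            · rfl
          have hsym2 : ∀ v : Int, s.count (target - v) = s.count v := by
            apply pvCount_sym_all s target
            intro v hv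
            have hvs : v ∈ skill := hperm.mem_iff.mp hv
            have := (pvB_check_iff skill _ target).mp htrue v hvs
            rw [hcnt, hcnt] at this
            have h1 : skill.count (target - v) = skill.count v := by exact_mod_cast this
            rw [hcount, hcount] at h1
            exact h1
          have hpal2 : pvPal s target := pvPal_of_count s target hsort hsym2
          have h0 := pvPal_getD s target hpal2 0 (by omega)
          rw [hlen, show n - 1 - 0 = n - 1 by omega] at h0
          have hti : target = t0 := by rw [ht0]; omega
          rw [hti] at hpal2
          exact hp hpal2
        simp only [dividePlayers_alt]
        rw [if_neg hgd, if_pos hcheck]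
    rw [hAv, hBv]

theorem dividePlayers_changed : Claim_changed_dividePlayers := by
  unfold Claim_changed_dividePlayers; decide
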